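-- pv_equiv track=rewrite | github.com/Joshuaisikah/s24-python-project- | soccerpack/composer/builder.py | build_position_data
-- ===== SOURCE A (Python) =====
-- def build_position_data(data):
--
--     temp_data = {}
--
--     # iterates over all countries
--     for country, player in data.items():
--
--         # for each country, iterates over all players
--         for player_name, player_data in player.items():
--             # the first entry in player_data is the position the
--             # player plays
--             player_position = player_data[0]
--
--             # if the position is not in the temp dictionary, creates the entry
--             # with that position as key and assigns as value the player name
--             if player_position not in temp_data:
--                 temp_data[player_position] = [player_name]
--
--             # if the position is already in the temp dictionary, references that entry
--             # and appends as value the player name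
--             else:
--                 temp_data[player_position].append(player_name)
--
--     return temp_data
-- ===== SOURCE B (Python) =====
-- def build_position_data(data):
--     flat = [(player_data[0], player_name)
--             for players in data.values()
--             for player_name, player_data in players.items()]
--     positions = dict.fromkeys(p for p, _ in flat)
--     return {p: [n for q, n in flat if q == p] for p in positions}
-- ===== Notes on version B (the rewrite author's own statement) =====
-- stated objective: alternative
-- what changed: Replaces A's single-pass dict mutation with a create-or-append branch by a three-stage pipeline: flatten the nested input to (position, name) pairs, compute the distinct positions in first-occurrence order, then rebuild each group by an independent filter scan of the flat list per position (no incremental dict state at all).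
import Mathlib
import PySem

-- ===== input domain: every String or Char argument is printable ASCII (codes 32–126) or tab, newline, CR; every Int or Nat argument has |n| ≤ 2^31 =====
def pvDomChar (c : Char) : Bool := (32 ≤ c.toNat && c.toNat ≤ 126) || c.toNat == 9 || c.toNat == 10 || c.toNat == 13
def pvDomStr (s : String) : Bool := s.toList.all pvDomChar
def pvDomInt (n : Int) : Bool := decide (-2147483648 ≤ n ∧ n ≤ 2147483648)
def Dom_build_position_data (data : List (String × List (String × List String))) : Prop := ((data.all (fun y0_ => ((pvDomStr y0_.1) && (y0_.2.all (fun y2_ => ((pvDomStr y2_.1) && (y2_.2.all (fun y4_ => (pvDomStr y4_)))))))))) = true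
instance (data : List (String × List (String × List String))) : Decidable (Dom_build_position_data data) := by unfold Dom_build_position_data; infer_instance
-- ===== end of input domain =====

-- ===== PORT A =====
-- B differs from A in algorithm: A grows a dict in one pass with a create-or-append branch;
-- B flattens to (position, name) pairs, computes the distinct positions, and rebuilds each
-- group by an independent filter scan of the flat list — no incremental dict state.
-- Port of A: one pass over countries/players, maintaining a PySem.Dict keyed by position.
def bpdStep (temp : PySem.Dict String (List String)) (pn : String × String) :
    PySem.Dict String (List String) :=
  if temp.contains pn.1 then temp.modify pn.1 [] (· ++ [pn.2])
  else temp.insert pn.1 [pn.2]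

def build_position_data (data : List (String × List (String × List String))) : List (String × List String) :=
  (data.foldl (fun temp cp =>
    cp.2.foldl (fun temp np =>
      let pos := (PySem.List.pyGet? np.2 0).getD ""   -- player_data[0]; Pre_ guarantees the index is in range
      bpdStep temp (pos, np.1)) temp) PySem.Dict.empty).items

-- ===== PORT B =====
def build_position_data_alt (data : List (String × List (String × List String))) : List (String × List String) :=
  let flat := data.flatMap (fun cp => cp.2.map (fun np => ((PySem.List.pyGet? np.2 0).getD "", np.1)))
  let positions := PySem.List.dedup (flat.map (·.1))
  positions.map (fun p => (p, (flat.filter (fun pn => pn.1 == p)).map (·.2)))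

-- ===== PRECONDITION & SPEC =====
-- Pre_: every player's data list is nonempty (player_data[0] exists); on empty lists A raises IndexError.
def Pre_build_position_data (data : List (String × List (String × List String))) : Prop :=
  ∀ cp ∈ data, ∀ np ∈ cp.2, np.2 ≠ []
instance (data : List (String × List (String × List String))) : Decidable (Pre_build_position_data data) := by unfold Pre_build_position_data; infer_instance
def pvWitness_build_position_data : (List (String × List (String × List String))) :=
  [("ITA", [("Rossi", ["GK", "1"]), ("Bianchi", ["DF"])]), ("FRA", [("Dupont", ["GK"])])]

def Spec_build_position_data (data : List (String × List (String × List String))) (out : List (String × List String)) : Prop := out = build_position_data_alt data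
instance (data : List (String × List (String × List String))) (out : List (String × List String)) : Decidable (Spec_build_position_data data out) := by unfold Spec_build_position_data; infer_instance

-- ===== CLAIM (what is proved, stated in full; the proofs are below) =====
def Claim_equal_build_position_data : Prop := ∀ (data : List (String × List (String × List String))), Dom_build_position_data data → Pre_build_position_data data → Spec_build_position_data data (build_position_data data)

-- ===== LEMMAS AND PROOFS =====
-- A's step is exactly the uniform modify-append step.
theorem bpdStep_eq_modify (temp : PySem.Dict String (List String)) (pn : String × String) :
    bpdStep temp pn = temp.modify pn.1 [] (· ++ [pn.2]) := by
  unfold bpdStep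
  split
  · rfl
  · next h =>
    simp [PySem.Dict.modify, PySem.Dict.getD_of_not_contains, Bool.eq_false_iff.mpr h]

-- Collapse the nested country/player fold into a single fold over the flattened pair list.
theorem foldl_flatten (data : List (String × List (String × List String)))
    (init : PySem.Dict String (List String)) :
    data.foldl (fun temp cp =>
      cp.2.foldl (fun temp np =>
        bpdStep temp ((PySem.List.pyGet? np.2 0).getD "", np.1)) temp) init
      = (data.flatMap (fun cp => cp.2.map (fun np => ((PySem.List.pyGet? np.2 0).getD "", np.1)))).foldl
          bpdStep init := by
  induction data generalizing init with
  | nil => rfl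
  | cons x xs ih =>
    simp only [List.flatMap_cons, List.foldl_append, List.foldl_cons, List.foldl_map, ih]

-- The modify-append fold from the empty dict, read back as items: dedup'd keys,
-- each with the filtered names — exactly B's value.
theorem foldl_modify_items (flat : List (String × String)) :
    (flat.foldl (fun d pn => d.modify pn.1 [] (· ++ [pn.2])) PySem.Dict.empty).items
      = (PySem.List.dedup (flat.map (·.1))).map
          (fun pos => (pos, (flat.filter (fun pn => pn.1 == pos)).map (·.2))) := by
  set d := flat.foldl (fun d pn => d.modify pn.1 [] (· ++ [pn.2])) PySem.Dict.empty with hd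
  have hnd : d.keys.Nodup := by
    rw [hd]
    exact PySem.Dict.nodup_keys_foldl_modify_key flat (·.1) [] (fun d pn => (· ++ [pn.2])) PySem.Dict.empty (by simp)
  have hkeys : d.keys = PySem.List.dedup (flat.map (·.1)) := by
    rw [hd]
    rw [show (fun (d : PySem.Dict String (List String)) (pn : String × String) =>
          d.modify pn.1 [] (· ++ [pn.2]))
        = (fun d pn => d.modify ((·.1 : String × String → String) pn) [] ((fun d pn => (· ++ [pn.2])) d pn)) from rfl]
    rw [PySem.Dict.keys_foldl_modify_key]
    simp [PySem.Dict.keys_empty, PySem.Set.update_nil_left, PySem.List.dedup_eq_ofList]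
  have hget : ∀ pos, d.getD pos [] = (flat.filter (fun pn => pn.1 == pos)).map (·.2) := by
    intro pos
    rw [hd, PySem.Dict.getD_foldl_modify_append, PySem.Dict.getD_empty]
    simp
  rw [PySem.Dict.items_eq_map_keys d hnd [], hkeys]
  exact List.map_congr_left (fun pos _ => by rw [hget pos])

-- ===== VERDICT (by name: the statement is the Claim_ definition above) =====
theorem build_position_data_spec : Claim_equal_build_position_data := by
  intro data _ _
  unfold Spec_build_position_data build_position_data build_position_data_alt
  rw [foldl_flatten]
  rw [show (bpdStep : PySem.Dict String (List String) → String × String → PySem.Dict String (List String))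
      = (fun d pn => d.modify pn.1 [] (· ++ [pn.2])) from funext fun d => funext fun pn => bpdStep_eq_modify d pn]
  exact foldl_modify_items _
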